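-- pv_equiv track=rewrite | github.com/sksrivastava/Python-Code-Practice | google_triplets.py | find_high_index
-- ===== SOURCE A (Python) =====
-- A = []
--
-- def find_high_index(a, arr=A):
--     l = len(arr) - 1
--     s = 0
--     res = l
--     if a > arr[l]:
--         return l
--     if a < arr[0]:
--         return -1
--     while s<=l:
--         mid = (s + l)//2
--         if arr[mid] == a:
--             return mid
--         elif arr[mid] > a:
--             l = mid - 1
--         else:
--             s = mid + 1
--             res = mid
--     return res
-- ===== SOURCE B (Python) =====
-- A = []
--
-- def find_high_index(a, arr=A):
--     n = len(arr)
--     if a > arr[n - 1]: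
--         return n - 1
--     if a < arr[0]:
--         return -1
--     return _search(arr, a, 0, n - 1, n - 1)
--
-- def _search(arr, a, low, high, res):
--     if low > high:
--         return res
--     mid = (low + high) // 2
--     v = arr[mid]
--     if v < a:
--         return _search(arr, a, mid + 1, high, mid)
--     if v > a:
--         return _search(arr, a, low, mid - 1, res)
--     return mid
-- ===== Notes on version B (the rewrite author's own statement) =====
-- stated objective: alternative
-- what changed: The iterative while-loop binary search is re-decomposed as a top-level guard pair delegating to a tail-recursive helper _search(arr, a, low, high, res) whose branches test trichotomy in the opposite order (less-than first), with the not-found result threaded as an accumulator.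
import Mathlib
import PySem

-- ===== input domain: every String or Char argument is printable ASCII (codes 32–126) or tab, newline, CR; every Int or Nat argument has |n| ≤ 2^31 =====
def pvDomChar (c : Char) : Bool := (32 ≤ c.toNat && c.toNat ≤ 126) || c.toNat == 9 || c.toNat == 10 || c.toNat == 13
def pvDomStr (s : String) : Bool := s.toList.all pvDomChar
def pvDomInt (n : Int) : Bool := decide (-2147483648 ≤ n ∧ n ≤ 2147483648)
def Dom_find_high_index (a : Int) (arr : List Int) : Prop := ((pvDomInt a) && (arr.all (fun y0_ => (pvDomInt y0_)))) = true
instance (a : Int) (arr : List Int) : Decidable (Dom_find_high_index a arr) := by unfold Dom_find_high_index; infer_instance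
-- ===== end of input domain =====

-- B re-decomposes A's iterative binary search into guards plus a tail-recursive helper
-- with reordered trichotomy branches (objective: alternative); return-value equivalence only.


-- ===== PORT A =====
-- A's while loop as structural recursion on the shrinking bracket; arr[mid] is always
-- in range for nonempty arr (the .getD 0 default is never used inside Pre_).
def findHighLoopA (a : Int) (arr : List Int) (s l res : Int) : Int :=
  if _h : s ≤ l then
    let mid := PySem.Int.floordiv (s + l) 2
    let v := (PySem.List.pyGet? arr mid).getD 0
    if v = a then mid
    else if v > a then findHighLoopA a arr s (mid - 1) res
    else findHighLoopA a arr (mid + 1) l mid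
  else res
termination_by (l - s + 1).toNat
decreasing_by
  · have := PySem.Int.floordiv_two_mid_bounds _h; omega
  · have := PySem.Int.floordiv_two_mid_bounds _h; omega

def find_high_index (a : Int) (arr : List Int) : Int :=
  let l : Int := (arr.length : Int) - 1
  match PySem.List.pyGet? arr l, PySem.List.pyGet? arr 0 with
  | some last, some first =>
      if a > last then l
      else if a < first then -1
      else findHighLoopA a arr 0 l l
  | _, _ => 0   -- IndexError on arr = [] (arr[-1]); excluded by Pre_

-- ===== PORT B =====
-- Source B's _search: base case low > high first, v < a branch first, res accumulator last.
def findHighSearchB (arr : List Int) (a low high res : Int) : Int :=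
  if _h : low > high then res
  else
    let mid := PySem.Int.floordiv (low + high) 2
    let v := (PySem.List.pyGet? arr mid).getD 0
    if v < a then findHighSearchB arr a (mid + 1) high mid
    else if v > a then findHighSearchB arr a low (mid - 1) res
    else mid
termination_by (high - low + 1).toNat
decreasing_by
  · have := PySem.Int.floordiv_two_mid_bounds (by omega : low ≤ high); omega
  · have := PySem.Int.floordiv_two_mid_bounds (by omega : low ≤ high); omega

def find_high_index_alt (a : Int) (arr : List Int) : Int :=
  let n : Int := (arr.length : Int)
  match PySem.List.pyGet? arr (n - 1) with
  | none => 0   -- IndexError on arr = [] (arr[n-1] = arr[-1]); excluded by Pre_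
  | some last =>
      if a > last then n - 1
      else
        match PySem.List.pyGet? arr 0 with
        | none => 0   -- unreachable for nonempty arr
        | some first =>
            if a < first then -1
            else findHighSearchB arr a 0 (n - 1) (n - 1)

-- ===== PRECONDITION & SPEC =====
-- A raises IndexError on arr[-1] when arr is empty; Pre_ excludes exactly that.
def Pre_find_high_index (_a : Int) (arr : List Int) : Prop := arr ≠ []
instance (a : Int) (arr : List Int) : Decidable (Pre_find_high_index a arr) := by unfold Pre_find_high_index; infer_instance
def pvWitness_find_high_index : Int × List Int := (3, [1, 3, 3, 7])

def Spec_find_high_index (a : Int) (arr : List Int) (out : Int) : Prop := out = find_high_index_alt a arr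
instance (a : Int) (arr : List Int) (out : Int) : Decidable (Spec_find_high_index a arr out) := by unfold Spec_find_high_index; infer_instance

-- ===== CLAIM (what is proved, stated in full; the proofs are below) =====
def Claim_equal_find_high_index : Prop := ∀ (a : Int) (arr : List Int), Dom_find_high_index a arr → Pre_find_high_index a arr → Spec_find_high_index a arr (find_high_index a arr)

-- ===== LEMMAS AND PROOFS =====

-- The while-loop recursion and the helper recursion compute the same value from the same state.
theorem findHighLoop_eq_search (a : Int) (arr : List Int) :
    ∀ (n : Nat) (s l res : Int), (l - s + 1).toNat ≤ n →
      findHighLoopA a arr s l res = findHighSearchB arr a s l res := by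
  intro n
  induction n with
  | zero =>
      intro s l res hn
      rw [findHighLoopA, findHighSearchB]
      simp [show ¬ s ≤ l by omega, show s > l by omega]
  | succ n ih =>
      intro s l res hn
      rw [findHighLoopA, findHighSearchB]
      by_cases h : s ≤ l
      · simp only [h, dite_true, show ¬ s > l by omega, dite_false]
        set mid := PySem.Int.floordiv (s + l) 2 with hmid
        obtain ⟨hb1, hb2⟩ := PySem.Int.floordiv_two_mid_bounds h
        set v := (PySem.List.pyGet? arr mid).getD 0 with hv
        rcases lt_trichotomy v a with hlt | heq | hgt
        · simp only [show ¬ v = a by omega, if_false, show ¬ v > a by omega, hlt, if_true]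
          exact ih (mid + 1) l mid (by omega)
        · simp [heq]
        · simp only [show ¬ v = a by omega, if_false, show ¬ v < a by omega,
            show v > a from hgt, if_true]
          exact ih s (mid - 1) res (by omega)
      · simp [h, show s > l by omega]

-- ===== VERDICT (by name: the statement is the Claim_ definition above) =====
theorem find_high_index_spec : Claim_equal_find_high_index := by
  intro a arr _dom hpre
  unfold Spec_find_high_index find_high_index find_high_index_alt
  cases harr : PySem.List.pyGet? arr ((arr.length : Int) - 1) with
  | none =>
      exfalso
      rw [PySem.List.pyGet?_eq_none_iff] at harr
      apply harr
      unfold PySem.Raise.InRange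
      have : arr.length ≠ 0 := fun h => hpre (List.eq_nil_of_length_eq_zero h)
      omega
  | some last =>
      cases h0 : PySem.List.pyGet? arr 0 with
      | none =>
          exfalso
          rw [PySem.List.pyGet?_eq_none_iff] at h0
          apply h0
          unfold PySem.Raise.InRange
          have : arr.length ≠ 0 := fun h => hpre (List.eq_nil_of_length_eq_zero h)
          omega
      | some first =>
          simp only [harr]
          split_ifs <;> first
            | rfl
            | exact findHighLoop_eq_search a arr _ 0 ((arr.length : Int) - 1) ((arr.length : Int) - 1) le_rfl
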